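-- pv_equiv track=rewrite | github.com/Gruka469/Python-Fundamentals-SoftUni | decipher_this.py | decipher_word
-- ===== SOURCE A (Python) =====
-- def decipher_word(word):
--     result = []
--     i = 0
--     while i < len(word):
--         if word[i].isdigit():
--             code = ""
--             while i < len(word) and word[i].isdigit():
--                 code += word[i]
--                 i += 1
--             result.append(chr(int(code)))
--         else:
--             result.append(word[i])
--             i += 1
--
--     if len(result) > 2:
--         result[1], result[-1] = result[-1], result[1]
--
--     return ''.join(result)
-- ===== SOURCE B (Python) =====
-- def decipher_word(word):
--     # Staged: compute digit/non-digit boundary cuts, slice into groups, decode each group, then swap.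
--     if not word:
--         return ""
--     n = len(word)
--     cuts = [i for i in range(1, n) if word[i].isdigit() != word[i - 1].isdigit()]
--     groups = [word[a:b] for a, b in zip([0] + cuts, cuts + [n])]
--     result = [c for g in groups
--                 for c in (chr(int(g)) if g[0].isdigit() else g)]
--     if len(result) > 2:
--         result[1], result[-1] = result[-1], result[1]
--     return ''.join(result)
-- ===== Notes on version B (the rewrite author's own statement) =====
-- stated objective: alternative
-- what changed: Replaced A's stateful index-walking while-loop (with a nested inner digit-scanning while) by a staged, loop-free pipeline: a comprehension computes the digit/non-digit boundary positions, zip of the shifted cut list produces the group slices, a comprehension decodes each group independently (chr(int(g)) for digit groups, the characters otherwise), and the same swap/join finishes; there is no per-character state machine or index mutation at all.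
-- outside the precondition, e.g. on decipher_word('1114112'): A raises ValueError, B raises ValueError
import Mathlib
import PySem

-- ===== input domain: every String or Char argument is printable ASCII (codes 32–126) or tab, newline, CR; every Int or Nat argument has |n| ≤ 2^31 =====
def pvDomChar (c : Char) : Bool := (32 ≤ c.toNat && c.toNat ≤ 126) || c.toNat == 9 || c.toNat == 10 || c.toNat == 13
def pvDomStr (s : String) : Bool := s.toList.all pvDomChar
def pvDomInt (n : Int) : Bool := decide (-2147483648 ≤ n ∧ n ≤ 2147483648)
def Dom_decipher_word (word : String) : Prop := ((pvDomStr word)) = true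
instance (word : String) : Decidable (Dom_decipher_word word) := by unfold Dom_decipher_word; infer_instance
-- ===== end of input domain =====

-- B replaces A's index-walking state machine by a staged pipeline (boundary cuts → zip slices →
-- decode each group → swap/join); objective: alternative decomposition, same asymptotic cost.

-- chr(int(code)) for a run of digit characters (both Pythons contain this exact expression)
def pvChrOfCode (code : List Char) : Char :=
  Char.ofNat ((PySem.Int.ofChars? code).getD 0).toNat

-- the tail swap + join shared verbatim by both Pythons:
-- if len(result) > 2: result[1], result[-1] = result[-1], result[1];  return ''.join(result)
def pvSwapJoin (r : List Char) : String :=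
  if 2 < r.length then
    String.mk ((r.set 1 (r.getD (r.length - 1) ' ')).set (r.length - 1) (r.getD 1 ' '))
  else String.mk r

-- ===== PORT A =====
-- A's inner `while i < len(word) and word[i].isdigit(): code += word[i]; i += 1`
def pvTakeCode : List Char → List Char × List Char
  | [] => ([], [])
  | c :: rest =>
    if PySem.Chars.isdigit c then
      ((c :: (pvTakeCode rest).1), (pvTakeCode rest).2)
    else ([], c :: rest)

theorem pvTakeCode_len (cs : List Char) : (pvTakeCode cs).2.length ≤ cs.length := by
  induction cs with
  | nil => simp [pvTakeCode]
  | cons c rest ih =>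
    by_cases h : PySem.Chars.isdigit c <;> simp [pvTakeCode, h] <;> omega

-- A's outer while over the index, as recursion on the remaining suffix with the growing result
def pvALoop (cs result : List Char) : List Char :=
  match cs with
  | [] => result
  | c :: rest =>
    if PySem.Chars.isdigit c then
      pvALoop (pvTakeCode rest).2 (result ++ [pvChrOfCode (c :: (pvTakeCode rest).1)])
    else pvALoop rest (result ++ [c])
termination_by cs.length
decreasing_by
  · exact Nat.lt_succ_of_le (pvTakeCode_len rest)
  · simp

def decipher_word (word : String) : String :=
  pvSwapJoin (pvALoop word.toList [])

-- ===== PORT B =====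
-- B's boundary test: word[i].isdigit() != word[i-1].isdigit()  (indices are always in range)
def pvPred (cs : List Char) (i : Int) : Bool :=
  PySem.Chars.isdigit (PySem.List.pyGetD cs i ' ')
    != PySem.Chars.isdigit (PySem.List.pyGetD cs (i - 1) ' ')

-- cuts = [i for i in range(1, n) if word[i].isdigit() != word[i-1].isdigit()]
def pvCuts (cs : List Char) : List Int :=
  (PySem.List.pyRange 1 (PySem.List.len cs) 1).filter (pvPred cs)

-- one group decoded: chr(int(g)) if g[0].isdigit() else g  (g is always nonempty)
def pvDec (g : List Char) : List Char :=
  if PySem.Chars.isdigit (g.headD ' ') then [pvChrOfCode g] else g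

-- groups = [word[a:b] for a, b in zip([0] + cuts, cuts + [n])]
def pvGroups (cs : List Char) : List (List Char) :=
  (((0 : Int) :: pvCuts cs).zip (pvCuts cs ++ [PySem.List.len cs])).map
    (fun p => PySem.List.slice cs (some p.1) (some p.2))

-- result = [c for g in groups for c in pvDec g]
def pvBody (cs : List Char) : List Char := (pvGroups cs).flatMap pvDec

def decipher_word_alt (word : String) : String :=
  if word.toList.isEmpty then "" else pvSwapJoin (pvBody word.toList)

-- ===== PRECONDITION & SPEC =====
-- Pre_ excludes words containing a maximal digit run whose value v has v > 0x10FFFF (there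
-- Python A raises ValueError in chr) or 0xD800 ≤ v ≤ 0xDFFF (there A returns a string holding a
-- lone surrogate, which is not representable as a Lean String; B returns the same string there).
def Pre_decipher_word (word : String) : Prop :=
  ∀ g ∈ word.toList.splitBy (fun a b => PySem.Chars.isdigit a == PySem.Chars.isdigit b),
    g.all PySem.Chars.isdigit = true →
    ((PySem.Int.ofChars? g).getD 0 < 55296 ∨
      (57344 ≤ (PySem.Int.ofChars? g).getD 0 ∧ (PySem.Int.ofChars? g).getD 0 ≤ 1114111))
instance (word : String) : Decidable (Pre_decipher_word word) := by
  unfold Pre_decipher_word; infer_instance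

def pvWitness_decipher_word : String := "He32llo119"

def Spec_decipher_word (word : String) (out : String) : Prop := out = decipher_word_alt word
instance (word : String) (out : String) : Decidable (Spec_decipher_word word out) := by
  unfold Spec_decipher_word; infer_instance

-- ===== CLAIM (what is proved, stated in full; the proofs are below) =====
def Claim_equal_decipher_word : Prop :=
  ∀ (word : String), Dom_decipher_word word → Pre_decipher_word word →
    Spec_decipher_word word (decipher_word word)

-- ===== LEMMAS AND PROOFS =====

-- A's loop, flattened to the list it appends (result-accumulator removed)
def pvAFlat : List Char → List Char
  | [] => []
  | c :: rest =>
    if PySem.Chars.isdigit c then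
      pvChrOfCode (c :: (pvTakeCode rest).1) :: pvAFlat (pvTakeCode rest).2
    else c :: pvAFlat rest
termination_by cs => cs.length
decreasing_by
  · exact Nat.lt_succ_of_le (pvTakeCode_len rest)
  · simp

theorem pvALoop_eq (cs : List Char) : ∀ res, pvALoop cs res = res ++ pvAFlat cs := by
  induction cs using pvAFlat.induct with
  | case1 => intro res; simp [pvALoop, pvAFlat]
  | case2 c rest h ih =>
      intro res; rw [pvALoop, pvAFlat]; simp only [h, if_true, ih]; simp
  | case3 c rest h ih =>
      intro res; rw [pvALoop, pvAFlat]; simp only [h, ih]; simp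

-- pvTakeCode splits off the maximal digit prefix
theorem pvTakeCode_spec (cs : List Char) :
    cs = (pvTakeCode cs).1 ++ (pvTakeCode cs).2 ∧
    (∀ c ∈ (pvTakeCode cs).1, PySem.Chars.isdigit c = true) ∧
    ((pvTakeCode cs).2 = [] ∨
      PySem.Chars.isdigit ((pvTakeCode cs).2.headD ' ') = false) := by
  induction cs with
  | nil => simp [pvTakeCode]
  | cons c rest ih =>
    by_cases h : PySem.Chars.isdigit c
    · refine ⟨?_, ?_, ?_⟩ <;> simp [pvTakeCode, h]
      · exact ih.1
      · exact fun x hx => ih.2.1 x hx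
      · simpa [List.headD_eq_head?] using ih.2.2
    · simp [pvTakeCode, h]

-- sliced shift: (r++t)[a+|r| : b+|r|] = t[a : b] for nonnegative a, b
theorem pvSliceShift (r t : List Char) (a b : Int) (ha : 0 ≤ a) (hb : 0 ≤ b) :
    PySem.List.slice (r ++ t) (some (a + (r.length : Int))) (some (b + (r.length : Int)))
      = PySem.List.slice t (some a) (some b) := by
  rw [PySem.List.slice_toNat _ (by omega) (by omega), PySem.List.slice_toNat _ ha hb]
  have h1 : (a + (r.length : Int)).toNat = r.length + a.toNat := by omega
  rw [h1]
  have h2 : (b + (r.length : Int)).toNat - (r.length + a.toNat) = b.toNat - a.toNat := by omega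
  rw [h2]
  simp only [List.drop_append]
  rw [show List.drop (r.length + a.toNat) r = [] from List.drop_eq_nil_of_le (by omega),
      List.nil_append]
  simp

-- the key run-split: a maximal uniform-digitness prefix becomes the first group
theorem pvBody_run (r t : List Char) (d : Bool) (hr : r ≠ [])
    (hall : ∀ c ∈ r, PySem.Chars.isdigit c = d)
    (ht : t = [] ∨ PySem.Chars.isdigit (t.headD ' ') = !d) :
    pvBody (r ++ t) = pvDec r ++ pvBody t := by
  have hL1 : (1:Int) ≤ (r.length : Int) := by
    have := List.length_pos_of_ne_nil hr; omega
  have hshift : ∀ (i : Int), 0 ≤ i →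
      PySem.List.pyGetD (r ++ t) (i + (r.length : Int)) ' ' = PySem.List.pyGetD t i ' ' := by
    intro i h0
    rw [show i = ((i.toNat : Nat) : Int) from by omega]
    rw [show ((i.toNat : Nat) : Int) + (r.length : Int) = ((i.toNat + r.length : Nat) : Int) from by
      omega]
    rw [PySem.List.pyGetD_natCast, PySem.List.pyGetD_natCast]
    rw [List.getD_append_right _ _ _ _ (by omega)]
    congr 1
    omega
  have hdigr : ∀ (i : Int), 0 ≤ i → i < (r.length : Int) →
      PySem.Chars.isdigit (PySem.List.pyGetD (r ++ t) i ' ') = d := by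
    intro i h0 hL
    rw [show i = ((i.toNat : Nat) : Int) from by omega, PySem.List.pyGetD_natCast]
    rw [List.getD_append _ _ _ _ (by omega)]
    rw [List.getD_eq_getElem _ _ (by omega)]
    exact hall _ (List.getElem_mem _)
  have hfilter1 : (PySem.List.pyRange 1 (r.length : Int) 1).filter (pvPred (r ++ t)) = [] := by
    rw [List.filter_eq_nil_iff]
    intro i hi
    rw [PySem.List.mem_pyRange_one] at hi
    unfold pvPred
    rw [hdigr i (by omega) hi.2, hdigr (i-1) (by omega) (by omega)]
    simp
  cases t with
  | nil =>
    have hB0 : pvBody ([] : List Char) = [] := by decide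
    simp only [List.append_nil] at hfilter1 ⊢
    rw [hB0, List.append_nil]
    have hcuts : pvCuts r = [] := by
      unfold pvCuts
      rw [PySem.List.len_eq, hfilter1]
    unfold pvBody pvGroups
    rw [hcuts]
    simp only [List.nil_append, List.zip_cons_cons, List.zip_nil_right, List.map_cons,
      List.map_nil, List.flatMap_cons, List.flatMap_nil, List.append_nil]
    rw [PySem.List.len_eq]
    rw [PySem.List.slice_zero_start, PySem.List.slice_to_natCast, List.take_length]
  | cons x xs =>
    have hnL : ((r ++ x :: xs).length : Int) = (r.length : Int) + ((x :: xs).length : Int) := by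
      push_cast [List.length_append]; ring
    have hxx : ((x :: xs).length : Int) = (xs.length : Int) + 1 := by
      push_cast [List.length_cons]; ring
    have htx : PySem.Chars.isdigit x = !d := by
      rcases ht with h | h
      · exact absurd h (by simp)
      · simpa using h
    -- the boundary at r.length is a cut
    have hpredL : pvPred (r ++ x :: xs) (r.length : Int) = true := by
      have hA : PySem.List.pyGetD (r ++ x :: xs) (r.length : Int) ' ' = x := by
        have h0 := hshift 0 le_rfl
        rw [zero_add] at h0
        rw [h0]
        exact PySem.List.pyGetD_zero_cons x xs ' '
      have hB : PySem.Chars.isdigit (PySem.List.pyGetD (r ++ x :: xs) ((r.length : Int) - 1) ' ') = d :=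
        hdigr _ (by omega) (by omega)
      unfold pvPred
      rw [hA, hB, htx]
      cases d <;> rfl
    -- the cut list of r ++ t is |r| followed by t's cuts shifted by |r|
    have hpredShift : ∀ i ∈ PySem.List.pyRange 1 ((x :: xs).length : Int) 1,
        pvPred (r ++ x :: xs) (i + (r.length : Int)) = pvPred (x :: xs) i := by
      intro i hi
      rw [PySem.List.mem_pyRange_one] at hi
      unfold pvPred
      rw [show i + (r.length : Int) - 1 = (i - 1) + (r.length : Int) from by ring]
      rw [hshift i (by omega), hshift (i - 1) (by omega)]
    have hshiftRange : PySem.List.pyRange ((r.length : Int) + 1) ((r ++ x :: xs).length : Int) 1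
        = (PySem.List.pyRange 1 ((x :: xs).length : Int) 1).map (fun i => i + (r.length : Int)) := by
      rw [PySem.List.pyRange_one, PySem.List.pyRange_one, List.map_map]
      rw [show (((r ++ x :: xs).length : Int) - ((r.length : Int) + 1)).toNat
          = (((x :: xs).length : Int) - 1).toNat from by omega]
      apply List.map_congr_left
      intro k _
      simp only [Function.comp_apply]
      omega
    have hcuts : pvCuts (r ++ x :: xs)
        = (r.length : Int) :: (pvCuts (x :: xs)).map (fun i => i + (r.length : Int)) := by
      unfold pvCuts
      rw [PySem.List.len_eq, PySem.List.len_eq]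
      rw [PySem.List.pyRange_one_append 1 (r.length : Int) _ hL1 (by omega)]
      rw [List.filter_append, hfilter1, List.nil_append]
      rw [PySem.List.pyRange_one_cons (by omega)]
      rw [List.filter_cons_of_pos hpredL]
      rw [hshiftRange, List.filter_map]
      congr 1
      refine congrArg _ (List.filter_congr ?_)
      intro i hi
      simpa using hpredShift i hi
    have hCnonneg : ∀ i ∈ pvCuts (x :: xs), 0 ≤ i := by
      intro i hi
      unfold pvCuts at hi
      have hm := (List.mem_filter.1 hi).1
      rw [PySem.List.len_eq, PySem.List.mem_pyRange_one] at hm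
      omega
    have hg1 : PySem.List.slice (r ++ x :: xs) (some 0) (some (r.length : Int)) = r := by
      rw [PySem.List.slice_zero_start, PySem.List.slice_to_natCast, List.take_left]
    have hLM : (r.length : Int) :: (pvCuts (x :: xs)).map (fun i => i + (r.length : Int))
        = ((0 : Int) :: pvCuts (x :: xs)).map (fun i => i + (r.length : Int)) := by
      simp
    have hM2 : (pvCuts (x :: xs)).map (fun i => i + (r.length : Int))
          ++ [((r ++ x :: xs).length : Int)]
        = (pvCuts (x :: xs) ++ [((x :: xs).length : Int)]).map (fun i => i + (r.length : Int)) := by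
      rw [List.map_append, List.map_singleton]
      congr 2
      omega
    have hslices : List.map ((fun p => PySem.List.slice (r ++ x :: xs) (some p.1) (some p.2)) ∘
          Prod.map (fun i => i + (r.length : Int)) (fun i => i + (r.length : Int)))
        (((0 : Int) :: pvCuts (x :: xs)).zip (pvCuts (x :: xs) ++ [((x :: xs).length : Int)]))
      = List.map (fun p => PySem.List.slice (x :: xs) (some p.1) (some p.2))
        (((0 : Int) :: pvCuts (x :: xs)).zip (pvCuts (x :: xs) ++ [((x :: xs).length : Int)])) := by
      apply List.map_congr_left
      rintro ⟨a, b⟩ hp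
      obtain ⟨ha, hb⟩ := List.of_mem_zip hp
      have ha0 : 0 ≤ a := by
        rcases List.mem_cons.1 ha with rfl | h
        · exact le_refl 0
        · exact hCnonneg a h
      have hb0 : 0 ≤ b := by
        rcases List.mem_append.1 hb with h | h
        · exact hCnonneg b h
        · simp only [List.mem_singleton] at h
          omega
      simpa using pvSliceShift r (x :: xs) a b ha0 hb0
    unfold pvBody pvGroups
    rw [hcuts]
    simp only [PySem.List.len_eq]
    rw [List.cons_append, List.zip_cons_cons, List.map_cons, List.flatMap_cons]
    rw [hLM, hM2, List.zip_map, List.map_map, hslices]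
    rw [hg1]

theorem pvAFlat_nondigit_prefix (r t : List Char)
    (hall : ∀ c ∈ r, PySem.Chars.isdigit c = false) :
    pvAFlat (r ++ t) = r ++ pvAFlat t := by
  induction r with
  | nil => simp
  | cons c r' ih =>
    have hc := hall c (by simp)
    rw [List.cons_append, pvAFlat]
    simp only [hc, Bool.false_eq_true, if_false]
    rw [ih (fun x hx => hall x (by simp [hx]))]
    simp

theorem pvAFlat_eq_body (cs : List Char) : pvAFlat cs = pvBody cs := by
  induction hn : cs.length using Nat.strong_induction_on generalizing cs with
  | _ n ih =>
  match cs with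
  | [] => rw [pvAFlat]; decide
  | c :: rest =>
    by_cases h : PySem.Chars.isdigit c
    · -- maximal digit run
      obtain ⟨hsplit, hdig, hnd⟩ := pvTakeCode_spec rest
      have hb := pvBody_run (c :: (pvTakeCode rest).1) (pvTakeCode rest).2 true
        (by simp)
        (by intro x hx; rcases List.mem_cons.1 hx with rfl | hx; exact h; exact hdig x hx)
        (by simpa [List.headD_eq_head?] using hnd)
      rw [pvAFlat]
      simp only [h, if_true]
      have hcs : c :: rest = (c :: (pvTakeCode rest).1) ++ (pvTakeCode rest).2 := by
        simpa using congrArg (c :: ·) hsplit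
      have hlt2 : (pvTakeCode rest).2.length < n := by
        have h1 := pvTakeCode_len rest
        simp only [List.length_cons] at hn
        omega
      rw [hcs, hb, ih _ hlt2 _ rfl]
      simp [pvDec, h]
    · -- maximal non-digit run via takeWhile/dropWhile
      set r := (c :: rest).takeWhile (fun x => !PySem.Chars.isdigit x) with hrdef
      set t := (c :: rest).dropWhile (fun x => !PySem.Chars.isdigit x) with htdef
      have hcs : c :: rest = r ++ t := (List.takeWhile_append_dropWhile).symm
      have hrne : r ≠ [] := by
        rw [hrdef]; simp [List.takeWhile, h]
      have hallr : ∀ x ∈ r, PySem.Chars.isdigit x = false := by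
        intro x hx
        have := List.mem_takeWhile_imp (hrdef ▸ hx)
        simpa using this
      have htd : t = [] ∨ PySem.Chars.isdigit (t.headD ' ') = true := by
        cases he : t with
        | nil => exact Or.inl rfl
        | cons x xs =>
          right
          have := List.head?_dropWhile_not (p := fun x => !PySem.Chars.isdigit x) (l := c :: rest)
          rw [← htdef, he] at this
          simpa using this
      have hb := pvBody_run r t false hrne hallr (by simpa using htd)
      rw [hcs, pvAFlat_nondigit_prefix r t hallr, hb]
      have hlt : t.length < n := by
        rw [← hn, hcs, List.length_append]
        rcases List.exists_cons_of_ne_nil hrne with ⟨y, ys, hy⟩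
        rw [hy]; simp
      rw [ih _ hlt _ rfl]
      rcases List.exists_cons_of_ne_nil hrne with ⟨y, ys, hy⟩
      have hdy : PySem.Chars.isdigit (r.headD ' ') = false := by
        rw [hy]; exact hallr y (by simp [hy])
      simp only [List.headD_eq_head?] at hdy
      simp [pvDec, hdy]

-- ===== VERDICT (by name: the statement is the Claim_ definition above) =====
theorem decipher_word_spec : Claim_equal_decipher_word := by
  intro word _ _
  unfold Spec_decipher_word decipher_word decipher_word_alt
  cases hw : word.toList with
  | nil => rw [pvALoop]; decide
  | cons c rest =>
    simp only [List.isEmpty_cons, Bool.false_eq_true, if_false]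
    rw [pvALoop_eq, List.nil_append, pvAFlat_eq_body]
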